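-- pv_equiv track=rewrite | github.com/joaoaugustocz/Grafos | Cenário1-PacMan/main.py | criarMatrizAdjacencia
-- ===== SOURCE A (Python) =====
-- def criarMatrizAdjacencia(ListaAdj):
--     n = len(ListaAdj)
--     # Inicializa uma matriz n x n com zeros
--     matrix = [[0 for _ in range(n)] for _ in range(n)]
--
--     # Para cada nó i, percorre seus vizinhos j
--     for i in range(n):
--         for j in ListaAdj[i]:
--             matrix[i][j] = 1
--             matrix[j][i] = 1  # Como o grafo é não direcionado
--
--     return matrix
-- ===== SOURCE B (Python) =====
-- def criarMatrizAdjacencia(ListaAdj):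
--     n = len(ListaAdj)
--     # neighbour sets, closed symmetrically by one reverse pass
--     viz = [set(row) for row in ListaAdj]
--     for i, row in enumerate(ListaAdj):
--         for j in row:
--             viz[j].add(i)
--     # a cell is 1 iff the edge is recorded in either direction
--     return [[1 if (j in viz[i] or i in viz[j]) else 0 for j in range(n)]
--             for i in range(n)]
-- ===== Notes on version B (the rewrite author's own statement) =====
-- stated objective: alternative
-- what changed: B builds per-vertex neighbour sets, closes them symmetrically with one reverse pass, and renders every matrix cell with a membership test in either direction, instead of A's initialise-an-n-x-n-zero-matrix-then-scatter pass that writes matrix[i][j] and matrix[j][i] for each edge; Pre_ excludes only the inputs with a neighbour id outside [-n, n-1], on which both programs raise IndexError.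
import Mathlib
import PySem

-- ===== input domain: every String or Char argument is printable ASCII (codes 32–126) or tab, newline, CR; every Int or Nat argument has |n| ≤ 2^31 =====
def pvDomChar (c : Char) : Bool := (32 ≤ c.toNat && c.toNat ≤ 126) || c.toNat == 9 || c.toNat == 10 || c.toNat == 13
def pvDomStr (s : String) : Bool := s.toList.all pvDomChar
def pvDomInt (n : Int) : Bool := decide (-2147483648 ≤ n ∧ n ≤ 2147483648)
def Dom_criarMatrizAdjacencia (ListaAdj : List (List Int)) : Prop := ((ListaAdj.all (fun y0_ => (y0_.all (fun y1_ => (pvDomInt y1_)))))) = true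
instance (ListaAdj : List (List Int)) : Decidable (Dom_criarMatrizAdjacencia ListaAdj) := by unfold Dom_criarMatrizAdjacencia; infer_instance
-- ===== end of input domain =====

-- B builds per-vertex neighbour sets, closes them symmetrically with one
-- reverse pass, and renders each cell by a membership test in either direction,
-- instead of A's zero-initialise-then-scatter edge writes; objective:
-- alternative (not faster).
-- ===== PORT A =====
-- matrix[r][c] = 1 : row read, row update, row write-back (pyGetD/pySetD are the
-- total forms of Python indexing, exact on indices in range — guaranteed by Pre_).
def pvMark (m : List (List Int)) (r c : Int) : List (List Int) :=
  PySem.List.pySetD m r (PySem.List.pySetD (PySem.List.pyGetD m r []) c 1)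

def criarMatrizAdjacencia (ListaAdj : List (List Int)) : List (List Int) :=
  let n : Int := ListaAdj.length
  let matrix := (PySem.List.pyRange 0 n 1).map
    (fun _ => (PySem.List.pyRange 0 n 1).map (fun _ => (0 : Int)))
  (PySem.List.pyRange 0 n 1).foldl
    (fun m i =>
      (PySem.List.pyGetD ListaAdj i []).foldl
        (fun m j => pvMark (pvMark m i j) j i) m)
    matrix

-- ===== PORT B =====
-- viz[j].add(i) — row read, set add, row write-back, exact on indices in range
def criarMatrizAdjacencia_alt (ListaAdj : List (List Int)) : List (List Int) :=
  let n : Int := ListaAdj.length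
  let viz : List (PySem.Set Int) := ListaAdj.map (fun row => PySem.Set.ofList row)
  let viz2 := (PySem.List.enumerate ListaAdj).foldl
    (fun vs p =>
      p.2.foldl
        (fun vs j => PySem.List.pySetD vs j
          (PySem.Set.add (PySem.List.pyGetD vs j PySem.Set.empty) p.1)) vs)
    viz
  (PySem.List.pyRange 0 n 1).map (fun i =>
    (PySem.List.pyRange 0 n 1).map (fun j =>
      if j ∈ PySem.List.pyGetD viz2 i PySem.Set.empty
          ∨ i ∈ PySem.List.pyGetD viz2 j PySem.Set.empty
      then (1 : Int) else 0))

-- ===== PRECONDITION & SPEC =====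
-- Pre_ is exactly A's domain: every neighbour id in [-n, n-1]; outside it both
-- programs raise IndexError at the same first out-of-range id.
def Pre_criarMatrizAdjacencia (ListaAdj : List (List Int)) : Prop :=
  ∀ row ∈ ListaAdj, ∀ j ∈ row,
    -(ListaAdj.length : Int) ≤ j ∧ j < (ListaAdj.length : Int)
instance (ListaAdj : List (List Int)) : Decidable (Pre_criarMatrizAdjacencia ListaAdj) := by
  unfold Pre_criarMatrizAdjacencia; infer_instance

def pvWitness_criarMatrizAdjacencia : List (List Int) := [[1], [-2]]

def Spec_criarMatrizAdjacencia (ListaAdj : List (List Int)) (out : List (List Int)) : Prop :=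
  out = criarMatrizAdjacencia_alt ListaAdj
instance (ListaAdj : List (List Int)) (out : List (List Int)) : Decidable (Spec_criarMatrizAdjacencia ListaAdj out) := by
  unfold Spec_criarMatrizAdjacencia; infer_instance

-- ===== CLAIM (what is proved, stated in full; the proofs are below) =====
def Claim_equal_criarMatrizAdjacencia : Prop :=
  ∀ (ListaAdj : List (List Int)), Dom_criarMatrizAdjacencia ListaAdj →
    Pre_criarMatrizAdjacencia ListaAdj →
    Spec_criarMatrizAdjacencia ListaAdj (criarMatrizAdjacencia ListaAdj)

-- ===== LEMMAS AND PROOFS =====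

-- an n × n 0/1 matrix described by a Boolean cell predicate
def pvRow (n : Nat) (Q : Nat → Bool) : List Int :=
  (List.range n).map fun c => if Q c then 1 else 0

def pvMat (n : Nat) (P : Nat → Nat → Bool) : List (List Int) :=
  (List.range n).map fun r => pvRow n (P r)

-- the canonical index of a (possibly negative, Python-style) in-range index
def pvWrap (n : Nat) (j : Int) : Nat := (if 0 ≤ j then j else j + n).toNat

theorem pvWrap_natCast {n r : Nat} : pvWrap n ((r : Nat) : Int) = r := by
  simp [pvWrap]

theorem pvWrap_lt {n : Nat} {j : Int} (hj : -(n : Int) ≤ j ∧ j < n) : pvWrap n j < n := by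
  unfold pvWrap; split_ifs <;> omega

theorem pvRow_length {n : Nat} {Q : Nat → Bool} : (pvRow n Q).length = n := by
  simp [pvRow]

theorem pvMat_length {n : Nat} {P : Nat → Nat → Bool} : (pvMat n P).length = n := by
  simp [pvMat]

theorem pvIdx_wrap {n : Nat} (len : Nat) (hlen : len = n)
    (j : Int) (hj : -(n : Int) ≤ j ∧ j < n) :
    PySem.List.pyIdx? len j = some (pvWrap n j) := by
  subst hlen
  simp only [PySem.List.pyIdx?, pvWrap]
  split_ifs <;> simp_all <;> omega

theorem pvGetD_wrap {α : Type} {n : Nat} (xs : List α) (hlen : xs.length = n)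
    (j : Int) (d : α) (hj : -(n : Int) ≤ j ∧ j < n) :
    PySem.List.pyGetD xs j d = xs.getD (pvWrap n j) d := by
  simp only [PySem.List.pyGetD, PySem.List.pyGet?, pvIdx_wrap xs.length hlen j hj]
  rw [List.getD_eq_getElem?_getD]
  simp

theorem pvSetD_wrap {α : Type} {n : Nat} (xs : List α) (hlen : xs.length = n)
    (j : Int) (v : α) (hj : -(n : Int) ≤ j ∧ j < n) :
    PySem.List.pySetD xs j v = xs.set (pvWrap n j) v := by
  simp only [PySem.List.pySetD, PySem.List.pySet?, pvIdx_wrap xs.length hlen j hj]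
  simp

theorem pvRow_congr {n : Nat} {Q Q' : Nat → Bool}
    (h : ∀ c, c < n → Q c = Q' c) : pvRow n Q = pvRow n Q' := by
  unfold pvRow
  apply List.ext_getElem <;> simp
  intro k hk; rw [h k hk]

theorem pvMat_congr {n : Nat} {P P' : Nat → Nat → Bool}
    (h : ∀ r c, r < n → c < n → P r c = P' r c) : pvMat n P = pvMat n P' := by
  unfold pvMat
  apply List.ext_getElem <;> simp
  intro r hr; exact pvRow_congr (fun c hc => h r c hr hc)

theorem pvRow_set {n : Nat} {Q : Nat → Bool} {c : Nat} (hc : c < n) :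
    (pvRow n Q).set c 1 = pvRow n (fun c' => Q c' || c' == c) := by
  unfold pvRow
  apply List.ext_getElem <;> simp
  intro k hk
  rw [List.getElem_set]
  by_cases h : c = k
  · subst h; simp
  · have h' : ¬ k = c := fun hh => h hh.symm
    simp [h, h']

theorem pvMat_getD {n : Nat} {P : Nat → Nat → Bool} {r : Nat} (hr : r < n) :
    (pvMat n P).getD r [] = pvRow n (P r) := by
  unfold pvMat
  rw [List.getD_eq_getElem?_getD]
  simp [hr]

theorem pvMat_set {n : Nat} {P : Nat → Nat → Bool} {r : Nat} (hr : r < n) (Q : Nat → Bool) :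
    (pvMat n P).set r (pvRow n Q) = pvMat n (fun r' c' => if r' == r then Q c' else P r' c') := by
  unfold pvMat
  apply List.ext_getElem <;> simp
  intro k hk
  rw [List.getElem_set]
  by_cases h : r = k
  · subst h; simp
  · have h' : ¬ k = r := fun hh => h hh.symm
    simp [h, h']

theorem pvMark_mat {n : Nat} {P : Nat → Nat → Bool} {r c : Nat} (hr : r < n) (hc : c < n) :
    pvMark (pvMat n P) (r : Int) (c : Int)
      = pvMat n (fun r' c' => P r' c' || (r' == r && c' == c)) := by
  unfold pvMark
  rw [PySem.List.pyGetD_natCast, PySem.List.pySetD_natCast, PySem.List.pySetD_natCast]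
  rw [pvMat_getD hr, pvRow_set hc, pvMat_set hr]
  apply pvMat_congr
  intro r' c' _ _
  by_cases h : r' = r <;> simp [h]

theorem pvMark_mat_int {n : Nat} {P : Nat → Nat → Bool} {a b : Int}
    (ha : -(n : Int) ≤ a ∧ a < n) (hb : -(n : Int) ≤ b ∧ b < n) :
    pvMark (pvMat n P) a b
      = pvMat n (fun r' c' => P r' c' || (r' == pvWrap n a && c' == pvWrap n b)) := by
  have hstep : pvMark (pvMat n P) a b
      = pvMark (pvMat n P) ((pvWrap n a : Nat) : Int) ((pvWrap n b : Nat) : Int) := by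
    unfold pvMark
    rw [pvGetD_wrap (pvMat n P) pvMat_length a [] ha,
        pvMat_getD (pvWrap_lt ha),
        pvSetD_wrap (pvRow n _) pvRow_length b 1 hb,
        pvSetD_wrap (pvMat n P) pvMat_length a _ ha,
        PySem.List.pyGetD_natCast, PySem.List.pySetD_natCast, PySem.List.pySetD_natCast,
        pvMat_getD (pvWrap_lt ha)]
  rw [hstep, pvMark_mat (pvWrap_lt ha) (pvWrap_lt hb)]

theorem pvInner_mat {n : Nat} {i : Nat} (hi : i < n) :
    ∀ (js : List Int) (P : Nat → Nat → Bool),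
      (∀ j ∈ js, -(n : Int) ≤ j ∧ j < (n : Int)) →
      js.foldl (fun m j => pvMark (pvMark m (i : Int) j) j (i : Int)) (pvMat n P)
        = pvMat n (fun r c =>
            P r c
              || (r == i && decide (c ∈ js.map (pvWrap n)))
              || (c == i && decide (r ∈ js.map (pvWrap n)))) := by
  intro js
  induction js with
  | nil =>
      intro P _
      rw [List.foldl_nil]
      apply pvMat_congr; intro r c _ _; simp
  | cons j js ih =>
      intro P hb
      have hj : -(n : Int) ≤ j ∧ j < n := hb j (List.mem_cons_self ..)
      have hin : -(n : Int) ≤ (i : Int) ∧ (i : Int) < n := by omega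
      rw [List.foldl_cons]
      rw [pvMark_mat_int hin hj, pvWrap_natCast]
      rw [pvMark_mat_int hj hin, pvWrap_natCast]
      rw [ih _ (fun j' hj' => hb j' (List.mem_cons_of_mem _ hj'))]
      apply pvMat_congr
      intro r c hrn hcn
      rw [Bool.eq_iff_iff]
      simp only [Bool.or_eq_true, Bool.and_eq_true, beq_iff_eq, decide_eq_true_eq,
        List.map_cons, List.mem_cons]
      constructor
      · tauto
      · tauto

theorem pvOuter_mat (L : List (List Int)) {n : Nat} (hn : n = L.length)
    (hpre : Pre_criarMatrizAdjacencia L) :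
    ∀ (is : List Nat) (P : Nat → Nat → Bool), (∀ i ∈ is, i < n) →
      List.foldl
        (fun (m : List (List Int)) (i : Nat) =>
          (PySem.List.pyGetD L ((i : Nat) : Int) []).foldl
            (fun m j => pvMark (pvMark m ((i : Nat) : Int) j) j ((i : Nat) : Int)) m)
        (pvMat n P) is
        = pvMat n (fun r c =>
            P r c || decide (∃ i ∈ is,
              (r = i ∧ c ∈ (L.getD i []).map (pvWrap n))
              ∨ (c = i ∧ r ∈ (L.getD i []).map (pvWrap n)))) := by
  intro is
  induction is with
  | nil =>
      intro P _
      rw [List.foldl_nil]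
      apply pvMat_congr; intro r c _ _; simp
  | cons i is ih =>
      intro P hb
      have hi : i < n := hb i (List.mem_cons_self ..)
      rw [List.foldl_cons, PySem.List.pyGetD_natCast]
      have hbnd : ∀ j ∈ L.getD i [], -(n : Int) ≤ j ∧ j < (n : Int) := by
        intro j hj
        have hrow : L.getD i [] ∈ L := by
          have hlen : i < L.length := by omega
          rw [List.getD_eq_getElem?_getD]
          simp [hlen]
        have := hpre _ hrow j hj
        omega
      rw [pvInner_mat hi (L.getD i []) P hbnd]
      rw [ih _ (fun i' hi' => hb i' (List.mem_cons_of_mem _ hi'))]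
      apply pvMat_congr
      intro r c hrn hcn
      rw [Bool.eq_iff_iff]
      simp only [Bool.or_eq_true, Bool.and_eq_true, beq_iff_eq, decide_eq_true_eq, List.mem_cons]
      constructor
      · rintro (((h | ⟨heq, hm⟩) | ⟨heq, hm⟩) | ⟨i', hi', hc⟩)
        · exact Or.inl h
        · exact Or.inr ⟨i, Or.inl rfl, Or.inl ⟨heq, hm⟩⟩
        · exact Or.inr ⟨i, Or.inl rfl, Or.inr ⟨heq, hm⟩⟩
        · exact Or.inr ⟨i', Or.inr hi', hc⟩
      · rintro (h | ⟨i', hi' | hi', hc⟩)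
        · exact Or.inl (Or.inl (Or.inl h))
        · subst hi'
          rcases hc with ⟨heq, hm⟩ | ⟨heq, hm⟩
          · exact Or.inl (Or.inl (Or.inr ⟨heq, hm⟩))
          · exact Or.inl (Or.inr ⟨heq, hm⟩)
        · exact Or.inr ⟨i', hi', hc⟩

-- A's result, as an n × n matrix of wrapped-membership tests
theorem pvA_eq_mat (L : List (List Int)) (hpre : Pre_criarMatrizAdjacencia L) :
    criarMatrizAdjacencia L
      = pvMat L.length (fun r c =>
          decide (c ∈ (L.getD r []).map (pvWrap L.length)
            ∨ r ∈ (L.getD c []).map (pvWrap L.length))) := by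
  have hA : criarMatrizAdjacencia L
      = (PySem.List.pyRange 0 (L.length : Int) 1).foldl
          (fun m i =>
            (PySem.List.pyGetD L i []).foldl (fun m j => pvMark (pvMark m i j) j i) m)
          ((PySem.List.pyRange 0 (L.length : Int) 1).map
            (fun _ => (PySem.List.pyRange 0 (L.length : Int) 1).map (fun _ => (0 : Int)))) := rfl
  have hz : List.map
        (fun _ : Int => List.map (fun _ : Int => (0 : Int))
          (List.map (fun k : Nat => (k : Int)) (List.range L.length)))
        (List.map (fun k : Nat => (k : Int)) (List.range L.length))
      = pvMat L.length (fun _ _ => false) := by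
    unfold pvMat pvRow
    apply List.ext_getElem
    · simp
    · intro r h1 h2
      simp [Function.comp_def, List.map_const']
  rw [hA, PySem.List.pyRange_zero_nat, hz]
  simp only [List.foldl_map]
  rw [pvOuter_mat L rfl hpre (List.range L.length) _ (fun i hi => List.mem_range.mp hi)]
  apply pvMat_congr
  intro r c hr hc
  rw [Bool.eq_iff_iff]
  simp only [Bool.false_or, decide_eq_true_eq, List.mem_range]
  constructor
  · rintro ⟨i, _, ⟨rfl, hm⟩ | ⟨rfl, hm⟩⟩
    · exact Or.inl hm
    · exact Or.inr hm
  · rintro (hm | hm)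
    · exact ⟨r, hr, Or.inl ⟨rfl, hm⟩⟩
    · exact ⟨c, hc, Or.inr ⟨rfl, hm⟩⟩

-- (vs.set a x).getD, pointwise
theorem pvSetGetD {α : Type} {n a r : Nat} (vs : List α) (hlen : vs.length = n)
    (ha : a < n) (x d : α) (hr : r < n) :
    (vs.set a x).getD r d = if r = a then x else vs.getD r d := by
  rw [List.getD_eq_getElem?_getD, List.getD_eq_getElem?_getD, List.getElem?_set]
  by_cases h : a = r
  · subst h; simp [hlen, ha]
  · have h' : ¬ r = a := fun hh => h hh.symm
    simp [h, h']

-- the inner loop 'for j in row: viz[j].add(x)', membership-wise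
theorem pvAddRow {n : Nat} (x : Int) :
    ∀ (js : List Int) (vs : List (PySem.Set Int)), vs.length = n →
      (∀ j ∈ js, -(n : Int) ≤ j ∧ j < (n : Int)) →
      (js.foldl (fun vs j => PySem.List.pySetD vs j
          (PySem.Set.add (PySem.List.pyGetD vs j PySem.Set.empty) x)) vs).length = n
      ∧ ∀ r, r < n → ∀ y : Int,
          (y ∈ (js.foldl (fun vs j => PySem.List.pySetD vs j
              (PySem.Set.add (PySem.List.pyGetD vs j PySem.Set.empty) x)) vs).getD r
              PySem.Set.empty
            ↔ y ∈ vs.getD r PySem.Set.empty ∨ (y = x ∧ r ∈ js.map (pvWrap n))) := by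
  intro js
  induction js with
  | nil =>
      intro vs hlen _
      refine ⟨hlen, fun r hr y => ?_⟩
      simp
  | cons j js ih =>
      intro vs hlen hb
      have hj := hb j (List.mem_cons_self ..)
      rw [List.foldl_cons,
          pvSetD_wrap vs hlen j _ hj, pvGetD_wrap vs hlen j _ hj]
      have hwlt : pvWrap n j < n := pvWrap_lt hj
      have hlen1 : (vs.set (pvWrap n j)
          (PySem.Set.add (vs.getD (pvWrap n j) PySem.Set.empty) x)).length = n := by
        simpa using hlen
      obtain ⟨hl, hm⟩ := ih _ hlen1 (fun j' hj'2 => hb j' (List.mem_cons_of_mem _ hj'2))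
      refine ⟨hl, fun r hr y => ?_⟩
      rw [hm r hr y,
          pvSetGetD vs hlen hwlt _ _ hr]
      simp only [List.map_cons, List.mem_cons]
      by_cases hrj : r = pvWrap n j
      · have hgd : vs.getD r PySem.Set.empty = vs.getD (pvWrap n j) PySem.Set.empty := by
          rw [hrj]
        simp only [if_pos hrj, PySem.Set.mem_add, hgd]
        constructor
        · rintro ((h | h) | h) <;> tauto
        · rintro (h | ⟨rfl, h | h⟩) <;> tauto
      · simp only [if_neg hrj]
        tauto

-- the outer loop over enumerate(ListaAdj), membership-wise
theorem pvSymFold {n : Nat} :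
    ∀ (ps : List (Int × List Int)) (vs : List (PySem.Set Int)), vs.length = n →
      (∀ p ∈ ps, ∀ j ∈ p.2, -(n : Int) ≤ j ∧ j < (n : Int)) →
      (ps.foldl (fun vs p => p.2.foldl (fun vs j => PySem.List.pySetD vs j
          (PySem.Set.add (PySem.List.pyGetD vs j PySem.Set.empty) p.1)) vs) vs).length = n
      ∧ ∀ r, r < n → ∀ y : Int,
          (y ∈ (ps.foldl (fun vs p => p.2.foldl (fun vs j => PySem.List.pySetD vs j
              (PySem.Set.add (PySem.List.pyGetD vs j PySem.Set.empty) p.1)) vs) vs).getD r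
              PySem.Set.empty
            ↔ y ∈ vs.getD r PySem.Set.empty
              ∨ ∃ p ∈ ps, y = p.1 ∧ r ∈ p.2.map (pvWrap n)) := by
  intro ps
  induction ps with
  | nil =>
      intro vs hlen _
      refine ⟨hlen, fun r hr y => ?_⟩
      simp
  | cons p ps ih =>
      intro vs hlen hb
      rw [List.foldl_cons]
      obtain ⟨hl1, hm1⟩ := pvAddRow p.1 p.2 vs hlen (hb p (List.mem_cons_self ..))
      obtain ⟨hl, hm⟩ := ih _ hl1 (fun q hq => hb q (List.mem_cons_of_mem _ hq))
      refine ⟨hl, fun r hr y => ?_⟩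
      rw [hm r hr y, hm1 r hr y]
      simp only [List.mem_cons]
      constructor
      · rintro ((h | h) | ⟨q, hq, h⟩) <;> [tauto; exact Or.inr ⟨p, Or.inl rfl, h⟩;
          exact Or.inr ⟨q, Or.inr hq, h⟩]
      · rintro (h | ⟨q, rfl | hq, h⟩) <;> tauto

-- B's result, as the same n × n matrix of wrapped-membership tests
theorem pvAlt_eq_mat (L : List (List Int)) (hpre : Pre_criarMatrizAdjacencia L) :
    criarMatrizAdjacencia_alt L
      = pvMat L.length (fun r c =>
          decide (c ∈ (L.getD r []).map (pvWrap L.length)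
            ∨ r ∈ (L.getD c []).map (pvWrap L.length))) := by
  have hb : ∀ p ∈ PySem.List.enumerate L 0, ∀ j ∈ p.2,
      -(L.length : Int) ≤ j ∧ j < (L.length : Int) := by
    intro p hp j hj
    obtain ⟨k, hk, rfl⟩ := (PySem.List.mem_enumerate_iff _ _ _).mp hp
    exact hpre _ (List.getElem_mem hk) j hj
  have hlen0 : (L.map (fun row => PySem.Set.ofList row)).length = L.length := by simp
  obtain ⟨hl, hm⟩ := pvSymFold (n := L.length) (PySem.List.enumerate L 0)
      (L.map (fun row => PySem.Set.ofList row)) hlen0 hb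
  have hinit : ∀ r : Nat, r < L.length →
      (L.map (fun row => PySem.Set.ofList row)).getD r PySem.Set.empty
        = PySem.Set.ofList (L.getD r []) := by
    intro r hr
    rw [List.getD_eq_getElem?_getD, List.getElem?_map, List.getD_eq_getElem?_getD]
    simp [hr]
  -- a single membership test against the closed sets, on the raw rows
  have hchar : ∀ r c : Nat, r < L.length → c < L.length →
      ((c : Int) ∈ ((PySem.List.enumerate L 0).foldl
          (fun vs p => p.2.foldl (fun vs j => PySem.List.pySetD vs j
            (PySem.Set.add (PySem.List.pyGetD vs j PySem.Set.empty) p.1)) vs)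
          (L.map (fun row => PySem.Set.ofList row))).getD r PySem.Set.empty
        ↔ ((c : Int) ∈ L.getD r [] ∨ r ∈ (L.getD c []).map (pvWrap L.length))) := by
    intro r c hr hc
    rw [hm r hr (c : Int), hinit r hr, PySem.Set.mem_ofList]
    constructor
    · rintro (h | ⟨p, hp, h1, h2⟩)
      · exact Or.inl h
      · obtain ⟨k, hk, rfl⟩ := (PySem.List.mem_enumerate_iff _ _ _).mp hp
        simp only at h1 h2
        have hkc : k = c := by omega
        subst hkc
        refine Or.inr ?_
        rw [List.getD_eq_getElem?_getD]
        simpa [hk] using h2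
    · rintro (h | h)
      · exact Or.inl h
      · refine Or.inr ⟨((0 : Int) + (c : Int), L[c]), ?_, by simp, ?_⟩
        · exact (PySem.List.mem_enumerate_iff _ _ _).mpr ⟨c, hc, rfl⟩
        · rw [List.getD_eq_getElem?_getD] at h
          simpa [hc] using h
  -- raw membership is subsumed by wrapped membership
  have hsub : ∀ r c : Nat, (c : Int) ∈ L.getD r [] →
      c ∈ (L.getD r []).map (pvWrap L.length) := by
    intro r c h
    exact List.mem_map.mpr ⟨(c : Int), h, pvWrap_natCast⟩
  have hB : criarMatrizAdjacencia_alt L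
      = (PySem.List.pyRange 0 (L.length : Int) 1).map (fun i =>
          (PySem.List.pyRange 0 (L.length : Int) 1).map (fun j =>
            if j ∈ PySem.List.pyGetD
                ((PySem.List.enumerate L 0).foldl
                  (fun vs p => p.2.foldl (fun vs j => PySem.List.pySetD vs j
                    (PySem.Set.add (PySem.List.pyGetD vs j PySem.Set.empty) p.1)) vs)
                  (L.map (fun row => PySem.Set.ofList row))) i PySem.Set.empty
              ∨ i ∈ PySem.List.pyGetD
                ((PySem.List.enumerate L 0).foldl
                  (fun vs p => p.2.foldl (fun vs j => PySem.List.pySetD vs j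
                    (PySem.Set.add (PySem.List.pyGetD vs j PySem.Set.empty) p.1)) vs)
                  (L.map (fun row => PySem.Set.ofList row))) j PySem.Set.empty
            then (1 : Int) else 0)) := rfl
  rw [hB, PySem.List.pyRange_zero_nat]
  unfold pvMat pvRow
  simp only [List.map_map]
  apply List.ext_getElem
  · simp
  · intro r h1 h2
    simp only [List.getElem_map, List.getElem_range, Function.comp]
    apply List.ext_getElem
    · simp
    · intro c h3 h4
      simp only [List.getElem_map, List.getElem_range, Function.comp]
      simp only [List.length_map, List.length_range] at h1 h3
      rw [PySem.List.pyGetD_natCast, PySem.List.pyGetD_natCast]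
      have h5 := hchar r c (by omega) (by omega)
      have h6 := hchar c r (by omega) (by omega)
      have hiff : (((c : Nat) : Int) ∈ ((PySem.List.enumerate L 0).foldl
            (fun vs p => p.2.foldl (fun vs j => PySem.List.pySetD vs j
              (PySem.Set.add (PySem.List.pyGetD vs j PySem.Set.empty) p.1)) vs)
            (L.map (fun row => PySem.Set.ofList row))).getD r PySem.Set.empty
          ∨ ((r : Nat) : Int) ∈ ((PySem.List.enumerate L 0).foldl
            (fun vs p => p.2.foldl (fun vs j => PySem.List.pySetD vs j
              (PySem.Set.add (PySem.List.pyGetD vs j PySem.Set.empty) p.1)) vs)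
            (L.map (fun row => PySem.Set.ofList row))).getD c PySem.Set.empty)
          ↔ (c ∈ (L.getD r []).map (pvWrap L.length)
             ∨ r ∈ (L.getD c []).map (pvWrap L.length)) := by
        rw [h5, h6]
        constructor
        · rintro ((h | h) | (h | h))
          · exact Or.inl (hsub r c h)
          · exact Or.inr h
          · exact Or.inr (hsub c r h)
          · exact Or.inl h
        · rintro (h | h)
          · exact Or.inr (Or.inr h)
          · exact Or.inl (Or.inr h)
      by_cases hcnd : c ∈ (L.getD r []).map (pvWrap L.length)
          ∨ r ∈ (L.getD c []).map (pvWrap L.length)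
      · rw [if_pos (hiff.mpr hcnd), if_pos (by simpa using hcnd)]
      · rw [if_neg (fun hh => hcnd (hiff.mp hh)), if_neg (by simpa using hcnd)]

-- ===== VERDICT (by name: the statement is the Claim_ definition above) =====
theorem criarMatrizAdjacencia_spec : Claim_equal_criarMatrizAdjacencia := by
  intro L _ hpre
  show criarMatrizAdjacencia L = criarMatrizAdjacencia_alt L
  rw [pvA_eq_mat L hpre, pvAlt_eq_mat L hpre]
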